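-- pv_equiv track=rewrite | github.com/yzouag/leetcode | expedia.py | complementary_pairs
-- ===== SOURCE A (Python) =====
-- from collections import defaultdict
--
-- def complementary_pairs(strings):
--     res = 0
--     bits = defaultdict(int)
--     for s in strings:
--         bitmask = 0
--         for c in s:
--             bitmask ^= (1 << (ord(c) - ord('a')))
--         if bitmask in bits:
--             res += bits[bitmask]
--         for i in range(26):
--             temp = bitmask ^ (1 << i)
--             if temp in bits:
--                 res += bits[temp]
--         bits[bitmask] += 1
--     return res
-- ===== SOURCE B (Python) =====
-- def complementary_pairs(strings):
--     # phase 1: frequency table of parity bitmasks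
--     cnt = {}
--     for s in strings:
--         m = 0
--         for c in s:
--             m ^= 1 << (ord(c) - ord('a'))
--         cnt[m] = cnt.get(m, 0) + 1
--     # phase 2: equal-mask pairs via C(k,2); cross pairs counted once from the smaller mask
--     res = 0
--     for m, k in cnt.items():
--         res += k * (k - 1) // 2
--         for i in range(26):
--             m2 = m ^ (1 << i)
--             if m < m2:
--                 res += k * cnt.get(m2, 0)
--     return res
-- ===== Notes on version B (the rewrite author's own statement) =====
-- stated objective: faster
-- what changed: B splits A's single interleaved count-and-probe loop into two phases: one pass builds the full frequency table of parity bitmasks, then a pass over the table adds C(k,2) for equal masks and counts each cross pair once from its smaller mask, so the 26 bit-probes run once per distinct mask instead of once per string.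
import Mathlib
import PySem

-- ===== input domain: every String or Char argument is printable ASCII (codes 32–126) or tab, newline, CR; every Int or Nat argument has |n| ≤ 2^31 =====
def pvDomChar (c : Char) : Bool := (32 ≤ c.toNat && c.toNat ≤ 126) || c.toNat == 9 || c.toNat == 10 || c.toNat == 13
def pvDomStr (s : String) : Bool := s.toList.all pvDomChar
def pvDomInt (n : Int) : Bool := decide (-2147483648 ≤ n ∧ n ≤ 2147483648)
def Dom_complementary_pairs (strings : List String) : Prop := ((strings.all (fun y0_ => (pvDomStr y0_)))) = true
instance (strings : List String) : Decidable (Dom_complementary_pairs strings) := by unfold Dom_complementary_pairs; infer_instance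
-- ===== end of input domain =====

-- B replaces A's single interleaved count-and-probe loop by two phases: one pass
-- building the full frequency table of bitmasks, then a pass over the table adding
-- C(k,2) for equal masks and counting each cross pair once from its smaller mask,
-- so the 26 bit-probes run per distinct mask rather than per string (measured faster).

-- ===== PORT A =====
-- bitmask loop of A: `for c in s: bitmask ^= 1 << (ord(c)-ord('a'))`.
-- Masks are kept as Nat (they are nonnegative ints in Python); exact for chars ≥ 'a'
-- (inside Pre_: Python raises ValueError on `1 << negative` for chars below 'a').
def pvBitmaskA (s : String) : Nat :=
  s.toList.foldl (fun bitmask c => bitmask ^^^ (1 <<< (c.toNat - 97))) 0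

def complementary_pairs (strings : List String) : Int :=
  -- state: (res, bits); `range(26)` ported as `List.range 26` (i is a nonnegative index)
  (strings.foldl (fun (st : Int × PySem.Dict Nat Int) s =>
      let bitmask := pvBitmaskA s
      let res := if st.2.contains bitmask then st.1 + st.2.getD bitmask 0 else st.1
      let res := (List.range 26).foldl (fun res i =>
          let temp := bitmask ^^^ (1 <<< i)
          if st.2.contains temp then res + st.2.getD temp 0 else res) res
      (res, st.2.modify bitmask 0 (· + 1)))            -- defaultdict(int): bits[bitmask] += 1
    (0, PySem.Dict.empty)).1

-- ===== PORT B =====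
-- same mask computation as Source B's inner char loop
def pvMaskB (s : String) : Nat :=
  s.toList.foldl (fun m c => m ^^^ (1 <<< (c.toNat - 97))) 0

def complementary_pairs_alt (strings : List String) : Int :=
  -- phase 1: cnt[m] = cnt.get(m, 0) + 1
  let cnt := strings.foldl (fun (cnt : PySem.Dict Nat Int) s =>
      let m := pvMaskB s
      cnt.insert m (cnt.getD m 0 + 1)) PySem.Dict.empty
  -- phase 2: for m, k in cnt.items(); `range(26)` ported as `List.range 26`
  cnt.items.foldl (fun res (p : Nat × Int) =>
      let res := res + PySem.Int.floordiv (p.2 * (p.2 - 1)) 2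
      (List.range 26).foldl (fun res i =>
          let m2 := p.1 ^^^ (1 <<< i)
          if p.1 < m2 then res + p.2 * cnt.getD m2 0 else res) res) 0

-- ===== PRECONDITION & SPEC =====
-- Pre_ excludes exactly the inputs where A raises ValueError: a character below 'a'
-- makes ord(c) - ord('a') negative and `1 << negative` raise (B raises there too).
def Pre_complementary_pairs (strings : List String) : Prop :=
  strings.all (fun s => s.toList.all (fun c => 97 ≤ c.toNat)) = true

instance (strings : List String) : Decidable (Pre_complementary_pairs strings) := by
  unfold Pre_complementary_pairs; infer_instance

def pvWitness_complementary_pairs : List String := ["ab", "b"]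

def Spec_complementary_pairs (strings : List String) (out : Int) : Prop := out = complementary_pairs_alt strings
instance (strings : List String) (out : Int) : Decidable (Spec_complementary_pairs strings out) := by unfold Spec_complementary_pairs; infer_instance

-- ===== CLAIM (what is proved, stated in full; the proofs are below) =====
def Claim_equal_complementary_pairs : Prop := ∀ (strings : List String), Dom_complementary_pairs strings → Pre_complementary_pairs strings → Spec_complementary_pairs strings (complementary_pairs strings)

-- ===== LEMMAS AND PROOFS =====

-- the 26 single bits A probes and B pairs by
def pvOneBits : List Nat := (List.range 26).map (fun i => 1 <<< i)

-- the pair test: two masks are complementary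
def pvMatch (m p : Nat) : Bool := decide (p ^^^ m = 0 ∨ p ^^^ m ∈ pvOneBits)

-- reference count: pairs contributed by a list of masks, coming after `seen`
def pvF (seen : List Nat) : List Nat → Int
  | [] => 0
  | m :: l => (seen.countP (pvMatch m) : Int) + pvF (seen ++ [m]) l

-- per-mask contribution in B's table pass, stated over the raw mask list
def pvG (l : List Nat) (x : Nat) : Int :=
  ((l.count x).choose 2 : Int)
    + ((List.range 26).map (fun i =>
        if x < x ^^^ (1 <<< i) then (l.count x : Int) * (l.count (x ^^^ (1 <<< i)) : Int) else 0)).sum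

-- B's total, as a sum over the distinct masks
def pvT (l : List Nat) : Int := ((PySem.List.dedup l).map (pvG l)).sum

theorem pv_xor_cancel (p m x : Nat) : p = m ^^^ x ↔ p ^^^ m = x := by
  constructor
  · rintro rfl; rw [Nat.xor_comm m x, Nat.xor_assoc]; simp
  · intro h
    have := congrArg (fun y => y ^^^ m) h
    simp only [Nat.xor_assoc, Nat.xor_self, Nat.xor_zero] at this
    rw [this, Nat.xor_comm]

theorem pv_shift_pos (i : Nat) : 0 < 1 <<< i := by
  rw [Nat.shiftLeft_eq]; positivity

theorem pv_xor_bit_ne (m i : Nat) : m ^^^ (1 <<< i) ≠ m := by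
  intro h
  have h2 := congrArg (fun y => m ^^^ y) h
  simp only [← Nat.xor_assoc, Nat.xor_self, Nat.zero_xor] at h2
  have := pv_shift_pos i
  omega

theorem pv_sum_indicator (l : List Nat) (f : Nat → Nat) (hf : (l.map f).Nodup) (d : Nat) :
    ((l.map (fun i => if d = f i then (1 : Int) else 0)).sum)
      = if d ∈ l.map f then 1 else 0 := by
  induction l with
  | nil => simp
  | cons a l ih =>
    simp only [List.map_cons, List.nodup_cons] at hf ⊢
    rw [List.sum_cons, ih hf.2]
    by_cases hd : d = f a
    · subst hd
      simp [hf.1]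
    · simp [hd]

-- a sum over a Nodup list of a function supported at one point
theorem pv_sum_single (L : List Nat) (hL : L.Nodup) (m : Nat) (A : Nat → Int) :
    (L.map (fun x => if x = m then A x else 0)).sum = if m ∈ L then A m else 0 := by
  induction L with
  | nil => simp
  | cons a L ih =>
    simp only [List.nodup_cons] at hL
    rw [List.map_cons, List.sum_cons, ih hL.2]
    by_cases ha : a = m
    · subst ha
      simp [hL.1]
    · simp [ha, Ne.symm ha]

theorem pv_sum_swap (L R : List Nat) (e : Nat → Nat → Int) :
    (L.map (fun x => (R.map (e x)).sum)).sum = (R.map (fun i => (L.map (fun x => e x i)).sum)).sum := by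
  induction L with
  | nil => simp
  | cons a L ih =>
    rw [List.map_cons, List.sum_cons, ih, ← PySem.List.sum_map_add_int]
    refine congrArg List.sum (List.map_congr_left (fun i _ => ?_))
    simp

-- the core counting identity: one membership test over `seen` counts exactly
-- what A's 27 dictionary probes add up to
theorem pv_core (seen : List Nat) (m : Nat) :
    (seen.countP (pvMatch m) : Int)
      = (seen.count m : Int)
        + ((List.range 26).map (fun i => (seen.count (m ^^^ (1 <<< i)) : Int))).sum := by
  induction seen with
  | nil =>
    simp
  | cons p seen ih =>
    rw [List.countP_cons, List.count_cons]
    have hsplit : ∀ i ∈ List.range 26,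
        (((p :: seen).count (m ^^^ (1 <<< i)) : Nat) : Int)
          = (seen.count (m ^^^ (1 <<< i)) : Int) + (if p = m ^^^ (1 <<< i) then 1 else 0) := by
      intro i _
      rw [List.count_cons]
      by_cases h : p = m ^^^ (1 <<< i) <;> simp [h, beq_iff_eq]
    rw [List.map_congr_left hsplit, PySem.List.sum_map_add_int]
    have hpoint : ((if pvMatch m p then 1 else 0 : Nat) : Int)
        = (if p = m then (1 : Int) else 0)
          + ((List.range 26).map (fun i => if p = m ^^^ (1 <<< i) then (1 : Int) else 0)).sum := by
      have hcancel : ∀ i, (p = m ^^^ (1 <<< i)) ↔ (p ^^^ m = 1 <<< i) := fun i => pv_xor_cancel p m _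
      have hmapeq : ((List.range 26).map (fun i => if p = m ^^^ (1 <<< i) then (1 : Int) else 0))
          = ((List.range 26).map (fun i => if p ^^^ m = 1 <<< i then (1 : Int) else 0)) := by
        refine List.map_congr_left (fun i _ => ?_)
        simp [hcancel i]
      rw [hmapeq, pv_sum_indicator (List.range 26) (fun i => 1 <<< i) (by decide) (p ^^^ m)]
      by_cases hpm : p = m
      · subst hpm
        simp [pvMatch, pvOneBits, Nat.xor_self]
      · have hne0 : p ^^^ m ≠ 0 := by simpa [Nat.xor_eq_zero_iff] using hpm
        simp [pvMatch, pvOneBits, hne0, hpm]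
    push_cast
    push_cast at ih hpoint
    rw [ih]
    rw [hpoint]
    simp only [beq_iff_eq]
    ring

-- A's fold computes pvF, given the counter invariant on `bits`
theorem pvA_fold (strings : List String) :
    ∀ (res : Int) (bits : PySem.Dict Nat Int) (seen : List Nat),
    (∀ k, bits.getD k 0 = (seen.count k : Int)) →
    (strings.foldl (fun (st : Int × PySem.Dict Nat Int) s =>
      let bitmask := pvBitmaskA s
      let res := if st.2.contains bitmask then st.1 + st.2.getD bitmask 0 else st.1
      let res := (List.range 26).foldl (fun res i =>
          let temp := bitmask ^^^ (1 <<< i)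
          if st.2.contains temp then res + st.2.getD temp 0 else res) res
      (res, st.2.modify bitmask 0 (· + 1)))
    (res, bits)).1 = res + pvF seen (strings.map pvBitmaskA) := by
  induction strings with
  | nil => intro res bits seen _; simp [pvF]
  | cons s strings ih =>
    intro res bits seen hinv
    simp only [List.foldl_cons, List.map_cons, pvF]
    -- a guarded dictionary read is just getD (absent keys read 0)
    have hread : ∀ k res', (if bits.contains k then res' + bits.getD k 0 else res')
        = res' + bits.getD k 0 := by
      intro k res'
      by_cases h : bits.contains k
      · simp [h]
      · rw [PySem.Dict.getD_of_not_contains bits 0 (by simpa using h)]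
        simp [h]
    have hinner : ∀ res', (List.range 26).foldl (fun res i =>
          if bits.contains (pvBitmaskA s ^^^ (1 <<< i))
          then res + bits.getD (pvBitmaskA s ^^^ (1 <<< i)) 0 else res) res'
        = res' + ((List.range 26).map (fun i => bits.getD (pvBitmaskA s ^^^ (1 <<< i)) 0)).sum := by
      intro res'
      have hfun : ((List.range 26).foldl (fun res i =>
            if bits.contains (pvBitmaskA s ^^^ (1 <<< i))
            then res + bits.getD (pvBitmaskA s ^^^ (1 <<< i)) 0 else res) res')
          = (List.range 26).foldl (fun res i => res + bits.getD (pvBitmaskA s ^^^ (1 <<< i)) 0) res' := by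
        refine PySem.List.foldl_congr_mem _ _ _ _ (fun res i _ => ?_)
        exact hread _ res
      rw [hfun, PySem.List.foldl_add]
    have hnew : ∀ k, (bits.modify (pvBitmaskA s) 0 (· + 1)).getD k 0
        = ((seen ++ [pvBitmaskA s]).count k : Int) := by
      intro k
      rw [PySem.Dict.getD_modify, List.count_append, List.count_singleton]
      by_cases h : k = pvBitmaskA s
      · subst h; simp [hinv]
      · have : (pvBitmaskA s == k) = false := by simpa [beq_iff_eq] using (Ne.symm h)
        simp [h, hinv k, this]
    rw [ih _ _ (seen ++ [pvBitmaskA s]) hnew]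
    rw [hread, hinner]
    have : ((List.range 26).map (fun i => bits.getD (pvBitmaskA s ^^^ (1 <<< i)) 0))
        = ((List.range 26).map (fun i => (seen.count (pvBitmaskA s ^^^ (1 <<< i)) : Int))) :=
      List.map_congr_left (fun i _ => hinv _)
    rw [this, hinv, pv_core seen (pvBitmaskA s)]
    ring

-- appending one mask to pvF's remaining list adds one membership count
theorem pvF_step (l : List Nat) : ∀ (seen : List Nat) (m : Nat),
    pvF seen (l ++ [m]) = pvF seen l + ((seen ++ l).countP (pvMatch m) : Int) := by
  induction l with
  | nil => intro seen m; simp [pvF]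
  | cons a l ih =>
    intro seen m
    simp only [List.cons_append, pvF]
    rw [ih (seen ++ [a]) m, List.append_assoc]
    ring_nf
    simp

-- how one new mask changes one entry of B's per-mask contribution
theorem pvG_append (l : List Nat) (m x : Nat) :
    pvG (l ++ [m]) x = pvG l x
      + (if x = m then ((l.count m : Int)
          + ((List.range 26).map (fun i =>
              if m < m ^^^ (1 <<< i) then (l.count (m ^^^ (1 <<< i)) : Int) else 0)).sum) else 0)
      + (if x ^^^ m ∈ pvOneBits ∧ x < m then (l.count x : Int) else 0) := by
  unfold pvG
  by_cases hxm : x = m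
  · subst hxm
    have hc : (l ++ [x]).count x = l.count x + 1 := by
      simp [List.count_append]
    have hchoose : (((l ++ [x]).count x).choose 2 : Int) = ((l.count x).choose 2 : Int) + (l.count x : Int) := by
      rw [hc]
      have : (l.count x + 1).choose 2 = (l.count x).choose 1 + (l.count x).choose 2 :=
        Nat.choose_succ_succ (l.count x) 1
      rw [this, Nat.choose_one_right]
      push_cast
      ring
    have hcross : ∀ i ∈ List.range 26,
        (if x < x ^^^ (1 <<< i) then ((l ++ [x]).count x : Int) * ((l ++ [x]).count (x ^^^ (1 <<< i)) : Int) else 0)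
          = (if x < x ^^^ (1 <<< i) then (l.count x : Int) * (l.count (x ^^^ (1 <<< i)) : Int) else 0)
            + (if x < x ^^^ (1 <<< i) then (l.count (x ^^^ (1 <<< i)) : Int) else 0) := by
      intro i _
      have hnot : (x ^^^ (1 <<< i)) ∉ [x] := by simp [pv_xor_bit_ne x i]
      have h2 : (l ++ [x]).count (x ^^^ (1 <<< i)) = l.count (x ^^^ (1 <<< i)) := by
        rw [List.count_append, List.count_eq_zero.mpr hnot, Nat.add_zero]
      by_cases h : x < x ^^^ (1 <<< i)
      · simp only [h, if_true, hc, h2]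
        push_cast
        ring
      · simp [h]
    rw [List.map_congr_left hcross, PySem.List.sum_map_add_int, hchoose]
    simp
    ring
  · have hnotx : x ∉ [m] := by simp [hxm]
    have hcx : (l ++ [m]).count x = l.count x := by
      rw [List.count_append, List.count_eq_zero.mpr hnotx, Nat.add_zero]
    have hcross : ∀ i ∈ List.range 26,
        (if x < x ^^^ (1 <<< i) then ((l ++ [m]).count x : Int) * ((l ++ [m]).count (x ^^^ (1 <<< i)) : Int) else 0)
          = (if x < x ^^^ (1 <<< i) then (l.count x : Int) * (l.count (x ^^^ (1 <<< i)) : Int) else 0)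
            + (if x ^^^ m = 1 <<< i then (if x < m then (l.count x : Int) else 0) else 0) := by
      intro i _
      have hsplit : ((l ++ [m]).count (x ^^^ (1 <<< i)) : Int)
          = (l.count (x ^^^ (1 <<< i)) : Int) + (if x ^^^ (1 <<< i) = m then 1 else 0) := by
        rw [List.count_append, List.count_cons]
        by_cases h : x ^^^ (1 <<< i) = m
        · simp [h]
        · simp [h, Ne.symm h]
      have hiff : x ^^^ (1 <<< i) = m ↔ x ^^^ m = 1 <<< i := by
        rw [eq_comm, pv_xor_cancel m x (1 <<< i), Nat.xor_comm]
      rw [hcx, hsplit]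
      by_cases h2 : x ^^^ (1 <<< i) = m
      · have h3 : x ^^^ m = 1 <<< i := hiff.mp h2
        by_cases h : x < x ^^^ (1 <<< i)
        · rw [h2] at h
          simp only [h2, h, h3, if_true]
          ring
        · rw [h2] at h
          simp only [h2, h, h3, if_true, if_false]
          simp [h]
      · have h3 : ¬ (x ^^^ m = 1 <<< i) := fun hh => h2 (hiff.mpr hh)
        simp only [h2, h3, if_false]
        by_cases h : x < x ^^^ (1 <<< i) <;> simp
    rw [List.map_congr_left hcross, PySem.List.sum_map_add_int, hcx]
    have hone : ((List.range 26).map (fun i =>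
        if x ^^^ m = 1 <<< i then (if x < m then (l.count x : Int) else 0) else 0)).sum
        = if x ^^^ m ∈ pvOneBits ∧ x < m then (l.count x : Int) else 0 := by
      have hmul : ∀ i ∈ List.range 26,
          (if x ^^^ m = 1 <<< i then (if x < m then (l.count x : Int) else 0) else 0)
            = (if x < m then (l.count x : Int) else 0) * (if x ^^^ m = 1 <<< i then (1 : Int) else 0) := by
        intro i _
        by_cases h : x ^^^ m = 1 <<< i <;> simp [h]
      rw [List.map_congr_left hmul, PySem.List.sum_map_const_mul_int,
          pv_sum_indicator (List.range 26) (fun i => 1 <<< i) (by decide) (x ^^^ m)]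
      by_cases hmem : x ^^^ m ∈ pvOneBits
      · simp only [pvOneBits] at hmem
        simp only [hmem, if_true, mul_one]
        by_cases h : x < m <;> simp [h, hmem, pvOneBits]
      · simp only [pvOneBits] at hmem
        simp [hmem, pvOneBits]
    rw [hone]
    simp [hxm]
    ring
-- (dedup of a snoc: unchanged if the element was seen, else appended)
theorem pv_dedup_append (l : List Nat) (m : Nat) :
    PySem.List.dedup (l ++ [m])
      = if m ∈ l then PySem.List.dedup l else PySem.List.dedup l ++ [m] := by
  have : PySem.List.dedup (l ++ [m]) = (PySem.Set.ofList l).add m := by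
    simp [PySem.List.dedup, PySem.Set.ofList, List.foldl_append]
  rw [this]
  by_cases h : m ∈ l
  · simp [PySem.Set.add, PySem.List.dedup, h]
  · simp [PySem.Set.add, PySem.List.dedup, h]

-- the key step: one more mask raises B's total by exactly A's 27-probe increment
theorem pvT_append (l : List Nat) (m : Nat) :
    pvT (l ++ [m]) = pvT l + (l.count m : Int)
      + ((List.range 26).map (fun i => (l.count (m ^^^ (1 <<< i)) : Int))).sum := by
  have hndd : (PySem.List.dedup l).Nodup := PySem.List.nodup_dedup l
  have hmemdd : ∀ x, x ∈ PySem.List.dedup l ↔ x ∈ l := fun x => PySem.List.mem_dedup l x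
  -- sums of the three addends of pvG_append over any Nodup list covering l's members
  have hsumG : ∀ (D : List Nat), D.Nodup → (∀ x, x ∈ D ↔ x ∈ l) →
      ((D.map (pvG (l ++ [m]))).sum
        = (D.map (pvG l)).sum
          + (if m ∈ l then ((l.count m : Int)
              + ((List.range 26).map (fun i =>
                  if m < m ^^^ (1 <<< i) then (l.count (m ^^^ (1 <<< i)) : Int) else 0)).sum) else 0)
          + ((List.range 26).map (fun i =>
              if m ^^^ (1 <<< i) < m then (l.count (m ^^^ (1 <<< i)) : Int) else 0)).sum) := by
    intro D hD hmem
    have h1 : (D.map (pvG (l ++ [m]))).sum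
        = (D.map (fun x => pvG l x
            + (if x = m then ((l.count m : Int)
                + ((List.range 26).map (fun i =>
                    if m < m ^^^ (1 <<< i) then (l.count (m ^^^ (1 <<< i)) : Int) else 0)).sum) else 0)
            + (if x ^^^ m ∈ pvOneBits ∧ x < m then (l.count x : Int) else 0))).sum :=
      congrArg List.sum (List.map_congr_left (fun x _ => pvG_append l m x))
    rw [h1, PySem.List.sum_map_add_int, PySem.List.sum_map_add_int]
    congr 1
    · congr 1
      rw [pv_sum_single D hD m _]
      by_cases h : m ∈ l
      · simp [h, (hmem m).mpr h]
      · have : m ∉ D := fun hh => h ((hmem m).mp hh)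
        simp [h, this]
    · -- supported on the 26 neighbours of m: expand, swap, collapse
      have hexp : ∀ x ∈ D,
          (if x ^^^ m ∈ pvOneBits ∧ x < m then (l.count x : Int) else 0)
            = ((List.range 26).map (fun i =>
                if x = m ^^^ (1 <<< i) then (if x < m then (l.count x : Int) else 0) else 0)).sum := by
        intro x _
        have hmul : ∀ i ∈ List.range 26,
            (if x = m ^^^ (1 <<< i) then (if x < m then (l.count x : Int) else 0) else 0)
              = (if x < m then (l.count x : Int) else 0) * (if x ^^^ m = 1 <<< i then (1 : Int) else 0) := by
          intro i _
          have hi : (x = m ^^^ (1 <<< i)) ↔ (x ^^^ m = 1 <<< i) := pv_xor_cancel x m (1 <<< i)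
          by_cases h : x ^^^ m = 1 <<< i
          · rw [if_pos (hi.mpr h), if_pos h, mul_one]
          · rw [if_neg (fun hh => h (hi.mp hh)), if_neg h, mul_zero]
        rw [List.map_congr_left hmul, PySem.List.sum_map_const_mul_int,
            pv_sum_indicator (List.range 26) (fun i => 1 <<< i) (by decide) (x ^^^ m)]
        by_cases hmem2 : x ^^^ m ∈ pvOneBits
        · simp only [pvOneBits] at hmem2
          simp only [hmem2, if_true, mul_one]
          by_cases h : x < m <;> simp [h, hmem2, pvOneBits]
        · simp only [pvOneBits] at hmem2
          simp [hmem2, pvOneBits]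
      rw [List.map_congr_left hexp, pv_sum_swap]
      refine congrArg List.sum (List.map_congr_left (fun i _ => ?_))
      rw [pv_sum_single D hD (m ^^^ (1 <<< i)) _]
      by_cases h : m ^^^ (1 <<< i) ∈ D
      · rw [if_pos h]
      · rw [if_neg h]
        have hnl : m ^^^ (1 <<< i) ∉ l := fun hh => h ((hmem _).mpr hh)
        rw [List.count_eq_zero.mpr hnl]
        simp
  -- combine the two guarded neighbour sums into the full one
  have hcombine : ((List.range 26).map (fun i =>
        if m < m ^^^ (1 <<< i) then (l.count (m ^^^ (1 <<< i)) : Int) else 0)).sum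
      + ((List.range 26).map (fun i =>
        if m ^^^ (1 <<< i) < m then (l.count (m ^^^ (1 <<< i)) : Int) else 0)).sum
      = ((List.range 26).map (fun i => (l.count (m ^^^ (1 <<< i)) : Int))).sum := by
    rw [← PySem.List.sum_map_add_int]
    refine congrArg List.sum (List.map_congr_left (fun i _ => ?_))
    rcases Nat.lt_or_ge m (m ^^^ (1 <<< i)) with h | h
    · rw [if_pos h, if_neg (by omega), add_zero]
    · have hne : m ^^^ (1 <<< i) ≠ m := pv_xor_bit_ne m i
      have h2 : m ^^^ (1 <<< i) < m := lt_of_le_of_ne h hne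
      rw [if_neg (by omega), if_pos h2, zero_add]
  unfold pvT
  rw [pv_dedup_append]
  by_cases h : m ∈ l
  · rw [if_pos h, hsumG _ hndd hmemdd, if_pos h, ← hcombine]
    ring
  · rw [if_neg h, List.map_append, List.sum_append,
        hsumG _ hndd hmemdd, if_neg h]
    have hG0 : pvG (l ++ [m]) m
        = ((List.range 26).map (fun i =>
            if m < m ^^^ (1 <<< i) then (l.count (m ^^^ (1 <<< i)) : Int) else 0)).sum := by
      rw [pvG_append l m m]
      have hc0 : l.count m = 0 := List.count_eq_zero.mpr h
      have hG : pvG l m = 0 := by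
        unfold pvG
        rw [hc0]
        simp
      rw [hG, hc0]
      simp
    simp only [List.map_cons, List.map_nil, List.sum_cons, List.sum_nil, hG0]
    rw [List.count_eq_zero.mpr h, ← hcombine]
    push_cast
    ring

-- k*(k-1)//2 on a count is the binomial coefficient
theorem pv_choose_floordiv (n : Nat) :
    PySem.Int.floordiv ((n : Int) * ((n : Int) - 1)) 2 = (n.choose 2 : Int) := by
  cases n with
  | zero => decide
  | succ k =>
    have : ((k + 1 : Nat) : Int) * (((k + 1 : Nat) : Int) - 1) = (((k + 1) * k : Nat) : Int) := by
      push_cast; ring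
    rw [this]
    have h2 : ((2 : Int)) = ((2 : Nat) : Int) := rfl
    rw [h2, PySem.Int.floordiv_natCast]
    congr 1
    rw [Nat.choose_two_right]
    simp

-- B's port evaluates to the reference sum pvT
theorem pvB_eval (strings : List String) :
    complementary_pairs_alt strings = pvT (strings.map pvMaskB) := by
  unfold complementary_pairs_alt
  have hcnt : (strings.foldl (fun (cnt : PySem.Dict Nat Int) s =>
      cnt.insert (pvMaskB s) (cnt.getD (pvMaskB s) 0 + 1)) PySem.Dict.empty)
      = PySem.Dict.counter (strings.map pvMaskB) := by
    rw [← PySem.Dict.foldl_insert_getD_add_one_eq_counter, List.foldl_map]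
  simp only [hcnt]
  set l := strings.map pvMaskB with hl
  rw [PySem.Dict.items_counter]
  have hofl : PySem.Set.ofList l = PySem.List.dedup l := by
    simp [PySem.List.dedup]
  rw [hofl, List.foldl_map]
  have hstep : ∀ (res : Int) (k : Nat), k ∈ PySem.List.dedup l →
      ((List.range 26).foldl (fun res i =>
          if k < k ^^^ (1 <<< i)
          then res + ((l.count k : Int)) * (PySem.Dict.counter l).getD (k ^^^ (1 <<< i)) 0 else res)
        (res + PySem.Int.floordiv ((l.count k : Int) * ((l.count k : Int) - 1)) 2))
      = res + pvG l k := by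
    intro res k _
    have hinner : ∀ r, ((List.range 26).foldl (fun res i =>
        if k < k ^^^ (1 <<< i)
        then res + ((l.count k : Int)) * (PySem.Dict.counter l).getD (k ^^^ (1 <<< i)) 0 else res) r)
        = r + ((List.range 26).map (fun i =>
            if k < k ^^^ (1 <<< i) then (l.count k : Int) * (l.count (k ^^^ (1 <<< i)) : Int) else 0)).sum := by
      intro r
      have hfun : ((List.range 26).foldl (fun res i =>
          if k < k ^^^ (1 <<< i)
          then res + ((l.count k : Int)) * (PySem.Dict.counter l).getD (k ^^^ (1 <<< i)) 0 else res) r)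
          = (List.range 26).foldl (fun res i =>
              res + (if k < k ^^^ (1 <<< i) then (l.count k : Int) * (l.count (k ^^^ (1 <<< i)) : Int) else 0)) r := by
        refine PySem.List.foldl_congr_mem _ _ _ _ (fun res i _ => ?_)
        rw [PySem.Dict.getD_counter]
        by_cases h : k < k ^^^ (1 <<< i) <;> simp [h]
      rw [hfun, PySem.List.foldl_add]
    rw [hinner, pv_choose_floordiv, pvG]
    ring
  -- the whole table pass is a sum of pvG over the distinct masks
  have : ∀ (D : List Nat), (∀ k ∈ D, k ∈ PySem.List.dedup l) → ∀ (res : Int),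
      (D.foldl (fun res k =>
        (List.range 26).foldl (fun res i =>
            if k < k ^^^ (1 <<< i)
            then res + ((l.count k : Int)) * (PySem.Dict.counter l).getD (k ^^^ (1 <<< i)) 0 else res)
          (res + PySem.Int.floordiv ((l.count k : Int) * ((l.count k : Int) - 1)) 2))
        res)
      = res + (D.map (pvG l)).sum := by
    intro D
    induction D with
    | nil => intro _ res; simp
    | cons a D ih =>
      intro hmem res
      rw [List.foldl_cons, hstep res a (hmem a List.mem_cons_self),
          ih (fun k hk => hmem k (List.mem_cons_of_mem a hk))]
      simp only [List.map_cons, List.sum_cons]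
      ring
  rw [this (PySem.List.dedup l) (fun k hk => hk) 0, pvT]
  ring

-- B's reference sum counts exactly the pairs A counts
theorem pvF_eq_pvT (l : List Nat) : pvF [] l = pvT l := by
  induction l using List.reverseRecOn with
  | nil => simp [pvF, pvT, PySem.List.dedup, PySem.Set.ofList]
  | append_singleton l m ih =>
    rw [pvF_step, List.nil_append, pv_core, pvT_append, ih]
    ring

-- ===== VERDICT (by name: the statement is the Claim_ definition above) =====
theorem complementary_pairs_spec : Claim_equal_complementary_pairs := by
  intro strings _ _
  unfold Spec_complementary_pairs complementary_pairs
  rw [pvA_fold strings 0 PySem.Dict.empty [] (fun k => by simp),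
      pvB_eval strings, zero_add]
  exact pvF_eq_pvT (strings.map pvBitmaskA)
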